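-- pv_equiv track=rewrite | github.com/nanometre380/Algorithms | programmers/77485.py | solution
-- ===== SOURCE A (Python) =====
-- def make_table(rows, columns) :
--     table = [[0 for _ in range(columns+1)] for _ in range(rows+1)]
--     for i in range(1, rows+1) :
--         for j in range(1, columns+1) :
--             table[i][j] = ((i-1)*columns+j)
--     return table
--
-- def rotate_table(x1, y1, x2, y2, table) :
--     tmp = table[x1][y1]
--     min_num = tmp
--
--     for x in range(x1+1, x2+1, 1) :
--         table[x-1][y1] = table[x][y1]
--         min_num = min(min_num, table[x][y1])
--     for y in range(y1+1, y2+1, 1) :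
--         table[x2][y-1] = table[x2][y]
--         min_num = min(min_num, table[x2][y])
--     for x in range(x2-1, x1-1, -1) :
--         table[x+1][y2] = table[x][y2]
--         min_num = min(min_num, table[x][y2])
--     for y in range(y2-1, y1-1, -1) :
--         table[x1][y+1] = table[x1][y]
--         min_num = min(min_num, table[x1][y])
--
--     table[x1][y1+1] = tmp
--     return table, min_num
--
-- def solution(rows, columns, queries):
--     table = make_table(rows, columns)
--     min_num = []
--     for q in queries :
--         x1, y1, x2, y2 = q
--         #return rotate_table(x1, y1, x2, y2, table)
--         table, min_temp = rotate_table(x1, y1, x2, y2, table)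
--         min_num.append(min_temp)
--     return min_num
-- ===== SOURCE B (Python) =====
-- def solution(rows, columns, queries):
--     table = [[(i - 1) * columns + j if i > 0 and j > 0 else 0
--               for j in range(columns + 1)] for i in range(rows + 1)]
--     result = []
--     for x1, y1, x2, y2 in queries:
--         # border cells, clockwise, in A's visiting order (ends at (x1, y1+1))
--         path = ([(x1, y1)]
--                 + [(x, y1) for x in range(x1 + 1, x2 + 1)]
--                 + [(x2, y) for y in range(y1 + 1, y2 + 1)]
--                 + [(x, y2) for x in range(x2 - 1, x1 - 1, -1)]
--                 + [(x1, y) for y in range(y2 - 1, y1, -1)])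
--         vals = [table[x][y] for x, y in path]
--         result.append(min(vals))
--         shifted = vals[1:] + vals[:1]
--         for (x, y), v in zip(path, shifted):
--             table[x][y] = v
--     return result
-- ===== Notes on version B (the rewrite author's own statement) =====
-- stated objective: simpler
-- what changed: B replaces A's four interleaved in-place shift loops (each moving one border cell and updating a running min) by a gather/compute/scatter decomposition: collect the border coordinates once, take min of the gathered values directly, and write the values back rotated by one position.
-- outside the precondition, e.g. on solution(2, 3, [(2, 1, 1, 1), (2, 2, 2, 1)]): A returns [4, 4], B returns [4, 5]; on solution(3, 3, [(-1, 1, 2, 2)]): A returns [0], B returns [0]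
import Mathlib
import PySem

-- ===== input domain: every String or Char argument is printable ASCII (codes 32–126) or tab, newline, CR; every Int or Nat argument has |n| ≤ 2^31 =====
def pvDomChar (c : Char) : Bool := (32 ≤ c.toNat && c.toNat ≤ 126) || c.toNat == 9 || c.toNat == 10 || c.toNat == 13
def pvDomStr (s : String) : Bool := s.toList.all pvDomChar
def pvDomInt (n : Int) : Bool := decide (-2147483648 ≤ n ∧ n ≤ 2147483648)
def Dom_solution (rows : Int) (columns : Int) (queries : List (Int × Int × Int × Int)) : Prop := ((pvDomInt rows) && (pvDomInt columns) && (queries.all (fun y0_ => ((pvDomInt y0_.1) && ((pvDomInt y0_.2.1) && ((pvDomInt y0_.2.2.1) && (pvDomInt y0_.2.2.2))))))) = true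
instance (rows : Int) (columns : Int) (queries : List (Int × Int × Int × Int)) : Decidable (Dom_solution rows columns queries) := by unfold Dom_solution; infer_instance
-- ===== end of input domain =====

-- B replaces A's four interleaved in-place border-shift loops by gather / min / scatter-shifted;
-- same cost, simpler decomposition.  A mutates its local table only, so no observable side effects.

-- ===== PORT A =====
-- table[x][y] read / write; exact for the in-range indices Pre_ admits (out of range Python raises).
def tget (t : List (List Int)) (x y : Int) : Int :=
  PySem.List.pyGetD (PySem.List.pyGetD t x []) y 0
def tset (t : List (List Int)) (x y : Int) (v : Int) : List (List Int) :=
  PySem.List.pySetD t x (PySem.List.pySetD (PySem.List.pyGetD t x []) y v)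

def make_table (rows columns : Int) : List (List Int) :=
  let table := (PySem.List.pyRange 0 (rows+1) 1).map
    (fun _ => (PySem.List.pyRange 0 (columns+1) 1).map (fun _ => (0 : Int)))
  (PySem.List.pyRange 1 (rows+1) 1).foldl (fun t i =>
    (PySem.List.pyRange 1 (columns+1) 1).foldl (fun t j => tset t i j ((i-1)*columns+j)) t) table

def rotate_table (x1 y1 x2 y2 : Int) (table : List (List Int)) : (List (List Int)) × Int :=
  let tmp := tget table x1 y1
  let s := (PySem.List.pyRange (x1+1) (x2+1) 1).foldl
      (fun (s : List (List Int) × Int) x =>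
        let t := tset s.1 (x-1) y1 (tget s.1 x y1); (t, min s.2 (tget t x y1))) (table, tmp)
  let s := (PySem.List.pyRange (y1+1) (y2+1) 1).foldl
      (fun (s : List (List Int) × Int) y =>
        let t := tset s.1 x2 (y-1) (tget s.1 x2 y); (t, min s.2 (tget t x2 y))) s
  let s := (PySem.List.pyRange (x2-1) (x1-1) (-1)).foldl
      (fun (s : List (List Int) × Int) x =>
        let t := tset s.1 (x+1) y2 (tget s.1 x y2); (t, min s.2 (tget t x y2))) s
  let s := (PySem.List.pyRange (y2-1) (y1-1) (-1)).foldl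
      (fun (s : List (List Int) × Int) y =>
        let t := tset s.1 x1 (y+1) (tget s.1 x1 y); (t, min s.2 (tget t x1 y))) s
  (tset s.1 x1 (y1+1) tmp, s.2)

def solution (rows : Int) (columns : Int) (queries : List (Int × Int × Int × Int)) : List Int :=
  (queries.foldl (fun (s : List (List Int) × List Int) q =>
      let r := rotate_table q.1 q.2.1 q.2.2.1 q.2.2.2 s.1
      (r.1, s.2 ++ [r.2])) (make_table rows columns, [])).2

-- ===== PORT B =====
-- border cells of the rectangle, clockwise, in A's visiting order (ends at (x1, y1+1))
def border (x1 y1 x2 y2 : Int) : List (Int × Int) :=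
  [(x1, y1)]
    ++ (PySem.List.pyRange (x1+1) (x2+1) 1).map (fun x => (x, y1))
    ++ (PySem.List.pyRange (y1+1) (y2+1) 1).map (fun y => (x2, y))
    ++ (PySem.List.pyRange (x2-1) (x1-1) (-1)).map (fun x => (x, y2))
    ++ (PySem.List.pyRange (y2-1) y1 (-1)).map (fun y => (x1, y))

def solution_alt (rows : Int) (columns : Int) (queries : List (Int × Int × Int × Int)) : List Int :=
  (queries.foldl (fun (s : List (List Int) × List Int) q =>
      let path := border q.1 q.2.1 q.2.2.1 q.2.2.2
      let vals := path.map (fun c => tget s.1 c.1 c.2)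
      let mn := (PySem.List.min? vals (fun v => v)).getD 0
      let shifted := PySem.List.slice vals (some 1) none ++ PySem.List.slice vals none (some 1)
      let t := (path.zip shifted).foldl (fun t cv => tset t cv.1.1 cv.1.2 cv.2) s.1
      (t, s.2 ++ [mn])) (make_table rows columns, [])).2

-- ===== PRECONDITION & SPEC =====
-- Pre_ restricts to the natural domain: every query a strictly proper rectangle of non-negative
-- corners inside the table (0 ≤ x1 < x2 ≤ rows, 0 ≤ y1 < y2 ≤ columns).  Outside it A raises IndexError, wraps negative
-- indices, or performs a degenerate "rotation" of a single row/column/cell whose outcome (e.g. writing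
-- a cell outside the rectangle) is accidental — a corner no statement of the task specifies.
def Pre_solution (rows : Int) (columns : Int) (queries : List (Int × Int × Int × Int)) : Prop :=
  ∀ q ∈ queries, 0 ≤ q.1 ∧ q.1 < q.2.2.1 ∧ q.2.2.1 ≤ rows ∧ 0 ≤ q.2.1 ∧ q.2.1 < q.2.2.2 ∧ q.2.2.2 ≤ columns
instance (rows : Int) (columns : Int) (queries : List (Int × Int × Int × Int)) : Decidable (Pre_solution rows columns queries) := by unfold Pre_solution; infer_instance

def pvWitness_solution : Int × Int × (List (Int × Int × Int × Int)) := (3, 3, [(1, 1, 2, 3), (1, 2, 3, 3)])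

def Spec_solution (rows : Int) (columns : Int) (queries : List (Int × Int × Int × Int)) (out : List Int) : Prop := out = solution_alt rows columns queries
instance (rows : Int) (columns : Int) (queries : List (Int × Int × Int × Int)) (out : List Int) : Decidable (Spec_solution rows columns queries out) := by unfold Spec_solution; infer_instance

-- ===== CLAIM (what is proved, stated in full; the proofs are below) =====
def Claim_equal_solution : Prop := ∀ (rows : Int) (columns : Int) (queries : List (Int × Int × Int × Int)), Dom_solution rows columns queries → Pre_solution rows columns queries → Spec_solution rows columns queries (solution rows columns queries)

-- ===== LEMMAS AND PROOFS =====

-- shape of a table: R rows, each of length C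
def Sh (t : List (List Int)) (R C : Nat) : Prop := t.length = R ∧ ∀ r ∈ t, r.length = C
-- a cell in range of such a table
def inR (R C : Nat) (c : Int × Int) : Prop := 0 ≤ c.1 ∧ c.1 < (R : Int) ∧ 0 ≤ c.2 ∧ c.2 < (C : Int)

-- chain step: write the value of the current cell into the previous cell, fold the min, remember the cell
def cstep (s : (List (List Int) × Int) × (Int × Int)) (c : Int × Int) : (List (List Int) × Int) × (Int × Int) :=
  let t := tset s.1.1 s.2.1 s.2.2 (tget s.1.1 c.1 c.2)
  ((t, min s.1.2 (tget t c.1 c.2)), c)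
-- scatter step
def wstep (t : List (List Int)) (cv : (Int × Int) × Int) : List (List Int) := tset t cv.1.1 cv.1.2 cv.2

theorem inR_elim {R C : Nat} {a b : Int} (h : inR R C (a, b)) :
    0 ≤ a ∧ a < (R : Int) ∧ 0 ≤ b ∧ b < (C : Int) := h

theorem tget_eq {t : List (List Int)} {R C : Nat} (h : Sh t R C) {a b : Int}
    (ha : inR R C (a, b)) (hlt : a.toNat < t.length) (hb : b.toNat < (t[a.toNat]).length) :
    tget t a b = (t[a.toNat])[b.toNat] := by
  obtain ⟨ha1, ha2, hb1, hb2⟩ := inR_elim ha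
  simp only [tget]
  rw [PySem.List.pyGetD_eq_getElem t [] ha1 (by omega)]
  rw [PySem.List.pyGetD_eq_getElem _ 0 hb1 (by omega)]

theorem tset_eq {t : List (List Int)} {R C : Nat} (h : Sh t R C) {a b : Int}
    (ha : inR R C (a, b)) (v : Int) (hlt : a.toNat < t.length) :
    tset t a b v = t.set a.toNat ((t[a.toNat]).set b.toNat v) := by
  obtain ⟨ha1, ha2, hb1, hb2⟩ := inR_elim ha
  simp only [tset]
  rw [PySem.List.pyGetD_eq_getElem t [] ha1 (by omega),
    PySem.List.pySetD_of_nonneg _ _ hb1, PySem.List.pySetD_of_nonneg _ _ ha1]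

theorem Sh_tset {t : List (List Int)} {R C : Nat} (h : Sh t R C) {a b : Int}
    (ha : inR R C (a, b)) (v : Int) : Sh (tset t a b v) R C := by
  have hlt : a.toNat < t.length := by
    obtain ⟨ha1, ha2, _, _⟩ := inR_elim ha; obtain ⟨h1, _⟩ := h; omega
  rw [tset_eq h ha v hlt]
  obtain ⟨h1, h2⟩ := h
  refine ⟨by simpa using h1, ?_⟩
  intro r hr
  rcases List.mem_or_eq_of_mem_set hr with hm | he
  · exact h2 r hm
  · rw [he]; simpa using h2 _ (List.getElem_mem hlt)

theorem tget_tset_self {t : List (List Int)} {R C : Nat} (h : Sh t R C) {a b : Int}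
    (ha : inR R C (a, b)) (v : Int) : tget (tset t a b v) a b = v := by
  obtain ⟨ha1, ha2, hb1, hb2⟩ := inR_elim ha
  have hlt : a.toNat < t.length := by obtain ⟨h1, _⟩ := h; omega
  have hrow : (t[a.toNat]).length = C := h.2 _ (List.getElem_mem hlt)
  have hs := Sh_tset h ha v
  rw [tset_eq h ha v hlt] at hs ⊢
  rw [tget_eq hs ha (by simpa using hlt) (by simp [List.getElem_set, hlt]; omega)]
  simp [List.getElem_set, hlt]

theorem tget_tset_ne {t : List (List Int)} {R C : Nat} (h : Sh t R C) {a b c d : Int}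
    (ha : inR R C (a, b)) (hc : inR R C (c, d)) (hne : (a, b) ≠ (c, d)) (v : Int) :
    tget (tset t a b v) c d = tget t c d := by
  obtain ⟨ha1, ha2, hb1, hb2⟩ := inR_elim ha
  obtain ⟨hc1, hc2, hd1, hd2⟩ := inR_elim hc
  have hlta : a.toNat < t.length := by obtain ⟨h1, _⟩ := h; omega
  have hltc : c.toNat < t.length := by obtain ⟨h1, _⟩ := h; omega
  have hrowc : (t[c.toNat]).length = C := h.2 _ (List.getElem_mem hltc)
  have hrowa : (t[a.toNat]).length = C := h.2 _ (List.getElem_mem hlta)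
  have hd : d.toNat < (t[c.toNat]).length := by omega
  have hs := Sh_tset h ha v
  rw [tset_eq h ha v hlta] at hs ⊢
  rw [tget_eq h hc hltc hd]
  by_cases hac : c.toNat = a.toNat
  · have hcae : c = a := by omega
    have hbd : d.toNat ≠ b.toNat := by
      intro hh
      exact hne (by simp [hcae] at hh ⊢; omega)
    rw [tget_eq hs hc (by simpa using hltc) ?hin]
    case hin => simp [List.getElem_set, hac, hlta]; omega
    simp only [List.getElem_set]
    split
    · rw [List.getElem_set_ne (by omega)]
      simp only [show a.toNat = c.toNat from hac.symm]
    · omega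
  · rw [tget_eq hs hc (by simpa using hltc) ?hin2]
    case hin2 => rw [List.getElem_set_ne (by omega)]; exact hd
    simp only [List.getElem_set]
    split
    · omega
    · rfl

theorem tset_tset_same {t : List (List Int)} {R C : Nat} (h : Sh t R C) {a b : Int}
    (ha : inR R C (a, b)) (v w : Int) : tset (tset t a b v) a b w = tset t a b w := by
  obtain ⟨ha1, ha2, hb1, hb2⟩ := inR_elim ha
  have hlt : a.toNat < t.length := by obtain ⟨h1, _⟩ := h; omega
  have hs := Sh_tset h ha v
  rw [tset_eq h ha v hlt] at hs
  rw [tset_eq h ha v hlt, tset_eq hs ha w (by simpa using hlt), tset_eq h ha w hlt]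
  simp [List.getElem_set, hlt, List.set_set]

theorem Sh_wr {R C : Nat} : ∀ (W : List ((Int × Int) × Int)) (t : List (List Int)),
    Sh t R C → (∀ p ∈ W, inR R C p.1) → Sh (W.foldl wstep t) R C := by
  intro W
  induction W with
  | nil => intro t h _; simpa using h
  | cons w W ih =>
    intro t h hW
    simp only [List.foldl_cons]
    exact ih _ (by simpa [wstep] using Sh_tset h (by simpa using hW w (by simp)) w.2)
      (fun p hp => hW p (by simp [hp]))

theorem tget_wr_notin {R C : Nat} : ∀ (W : List ((Int × Int) × Int)) (t : List (List Int)) (c : Int × Int),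
    Sh t R C → inR R C c → (∀ p ∈ W, inR R C p.1) → c ∉ W.map Prod.fst →
    tget (W.foldl wstep t) c.1 c.2 = tget t c.1 c.2 := by
  intro W
  induction W with
  | nil => intro t c _ _ _ _; rfl
  | cons w W ih =>
    intro t c h hc hW hni
    simp only [List.foldl_cons]
    rw [ih _ c (by simpa [wstep] using Sh_tset h (by simpa using hW w (by simp)) w.2) hc
      (fun p hp => hW p (by simp [hp])) (by simp at hni; simp [hni.2])]
    simp only [wstep]
    exact tget_tset_ne h (by simpa using hW w (by simp)) (by simpa using hc)
      (by simp at hni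
          intro hh; simp only [Prod.mk.injEq] at hh
          exact hni.1 (Prod.ext hh.1.symm hh.2.symm)) w.2

theorem chain_fresh {R C : Nat} : ∀ (cs : List (Int × Int)) (p : Int × Int) (t : List (List Int)) (m : Int),
    Sh t R C → (∀ c ∈ p :: cs, inR R C c) → (p :: cs).Nodup →
    cs.foldl cstep ((t, m), p) =
      ((((p :: cs).dropLast.zip (cs.map (fun c => tget t c.1 c.2))).foldl wstep t,
        cs.foldl (fun m c => min m (tget t c.1 c.2)) m), cs.getLastD p) := by
  intro cs
  induction cs with
  | nil => intro p t m _ _ _; simp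
  | cons c cs ih =>
    intro p t m hSh hin hnd
    have hpc : inR R C p := hin p (by simp)
    have hcc : inR R C c := hin c (by simp)
    have hpc' : inR R C (p.1, p.2) := by simpa using hpc
    have hcc' : inR R C (c.1, c.2) := by simpa using hcc
    have hpne : p ≠ c := by intro hh; simp [hh] at hnd
    have hne' : (p.1, p.2) ≠ (c.1, c.2) := by simpa using hpne
    simp only [List.foldl_cons, cstep]
    rw [tget_tset_ne hSh hpc' hcc' hne' (tget t c.1 c.2)]
    rw [ih c (tset t p.1 p.2 (tget t c.1 c.2)) (min m (tget t c.1 c.2))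
      (Sh_tset hSh hpc' _)
      (fun d hd => hin d (by simp at hd ⊢; tauto))
      (by simp at hnd ⊢; tauto)]
    have hvals : ∀ d ∈ cs, tget (tset t p.1 p.2 (tget t c.1 c.2)) d.1 d.2 = tget t d.1 d.2 := by
      intro d hd
      have hdd' : inR R C (d.1, d.2) := by simpa using hin d (by simp [hd])
      have hpd : p ≠ d := by intro hh; rw [hh] at hnd; simp [hd] at hnd
      exact tget_tset_ne hSh hpc' hdd' (by simpa using hpd) _
    simp only [Prod.mk.injEq]
    refine ⟨⟨?_, ?_⟩, by
      cases cs with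
      | nil => simp
      | cons a l => conv_rhs => rw [List.getLastD_cons]⟩
    · -- tables
      rw [List.map_congr_left hvals]
      rfl
    · -- mins
      show List.foldl _ (min m (tget t c.1 c.2)) cs = List.foldl _ (min m (tget t c.1 c.2)) cs
      exact PySem.List.foldl_congr_mem cs _ _ _ (fun acc d hd => by rw [hvals d hd])

theorem loop1_chain : ∀ (n : Nat) (a y1 : Int) (s : List (List Int) × Int),
    ((PySem.List.pyRange (a+1) (a+1+(n:Int)) 1).map (fun x => (x, y1))).foldl cstep (s, (a, y1))
      = ((PySem.List.pyRange (a+1) (a+1+(n:Int)) 1).foldl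
          (fun (s : List (List Int) × Int) x =>
            let t := tset s.1 (x-1) y1 (tget s.1 x y1); (t, min s.2 (tget t x y1))) s,
         (a+(n:Int), y1)) := by
  intro n
  induction n with
  | zero => intro a y1 s; simp [PySem.List.pyRange_one_eq_nil (by omega : a+1+(0:Int) ≤ a+1)]
  | succ k ih =>
    intro a y1 s
    rw [PySem.List.pyRange_one_cons (by push_cast; omega)]
    have he : a+1+((k+1 : Nat) : Int) = (a+1)+1+(k : Int) := by push_cast; ring
    rw [he]
    simp only [List.map_cons, List.foldl_cons]
    have hc : cstep (s, (a, y1)) (a+1, y1)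
        = ((tset s.1 a y1 (tget s.1 (a+1) y1),
            min s.2 (tget (tset s.1 a y1 (tget s.1 (a+1) y1)) (a+1) y1)), (a+1, y1)) := by
      simp [cstep]
    rw [hc, ih (a+1) y1]
    simp only [show a+1-1 = a from by ring, Prod.mk.injEq]
    exact ⟨trivial, by push_cast; ring, trivial⟩

theorem loop2_chain : ∀ (m : Nat) (b x2 : Int) (s : List (List Int) × Int),
    ((PySem.List.pyRange (b+1) (b+1+(m:Int)) 1).map (fun y => (x2, y))).foldl cstep (s, (x2, b))
      = ((PySem.List.pyRange (b+1) (b+1+(m:Int)) 1).foldl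
          (fun (s : List (List Int) × Int) y =>
            let t := tset s.1 x2 (y-1) (tget s.1 x2 y); (t, min s.2 (tget t x2 y))) s,
         (x2, b+(m:Int))) := by
  intro m
  induction m with
  | zero => intro b x2 s; simp [PySem.List.pyRange_one_eq_nil (by omega : b+1+(0:Int) ≤ b+1)]
  | succ k ih =>
    intro b x2 s
    rw [PySem.List.pyRange_one_cons (by push_cast; omega)]
    have he : b+1+((k+1 : Nat) : Int) = (b+1)+1+(k : Int) := by push_cast; ring
    rw [he]
    simp only [List.map_cons, List.foldl_cons]
    have hc : cstep (s, (x2, b)) (x2, b+1)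
        = ((tset s.1 x2 b (tget s.1 x2 (b+1)),
            min s.2 (tget (tset s.1 x2 b (tget s.1 x2 (b+1))) x2 (b+1))), (x2, b+1)) := by
      simp [cstep]
    rw [hc, ih (b+1) x2]
    simp only [show b+1-1 = b from by ring, Prod.mk.injEq]
    exact ⟨trivial, trivial, by push_cast; ring⟩

theorem loop3_chain : ∀ (n : Nat) (a y2 : Int) (s : List (List Int) × Int),
    ((PySem.List.pyRange (a-1) (a-1-(n:Int)) (-1)).map (fun x => (x, y2))).foldl cstep (s, (a, y2))
      = ((PySem.List.pyRange (a-1) (a-1-(n:Int)) (-1)).foldl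
          (fun (s : List (List Int) × Int) x =>
            let t := tset s.1 (x+1) y2 (tget s.1 x y2); (t, min s.2 (tget t x y2))) s,
         (a-(n:Int), y2)) := by
  intro n
  induction n with
  | zero => intro a y2 s; simp [PySem.List.pyRange_neg_one_eq_nil (by omega : a-1 ≤ a-1-(0:Int))]
  | succ k ih =>
    intro a y2 s
    rw [PySem.List.pyRange_neg_one_cons (by push_cast; omega)]
    have he : a-1-((k+1 : Nat) : Int) = (a-1)-1-(k : Int) := by push_cast; ring
    rw [he]
    simp only [List.map_cons, List.foldl_cons]
    have hc : cstep (s, (a, y2)) (a-1, y2)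
        = ((tset s.1 a y2 (tget s.1 (a-1) y2),
            min s.2 (tget (tset s.1 a y2 (tget s.1 (a-1) y2)) (a-1) y2)), (a-1, y2)) := by
      simp [cstep]
    rw [hc, ih (a-1) y2]
    simp only [show a-1+1 = a from by ring, Prod.mk.injEq]
    exact ⟨trivial, by push_cast; ring, trivial⟩

theorem loop4_chain : ∀ (m : Nat) (b x1 : Int) (s : List (List Int) × Int),
    ((PySem.List.pyRange (b-1) (b-1-(m:Int)) (-1)).map (fun y => (x1, y))).foldl cstep (s, (x1, b))
      = ((PySem.List.pyRange (b-1) (b-1-(m:Int)) (-1)).foldl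
          (fun (s : List (List Int) × Int) y =>
            let t := tset s.1 x1 (y+1) (tget s.1 x1 y); (t, min s.2 (tget t x1 y))) s,
         (x1, b-(m:Int))) := by
  intro m
  induction m with
  | zero => intro b x1 s; simp [PySem.List.pyRange_neg_one_eq_nil (by omega : b-1 ≤ b-1-(0:Int))]
  | succ k ih =>
    intro b x1 s
    rw [PySem.List.pyRange_neg_one_cons (by push_cast; omega)]
    have he : b-1-((k+1 : Nat) : Int) = (b-1)-1-(k : Int) := by push_cast; ring
    rw [he]
    simp only [List.map_cons, List.foldl_cons]
    have hc : cstep (s, (x1, b)) (x1, b-1)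
        = ((tset s.1 x1 b (tget s.1 x1 (b-1)),
            min s.2 (tget (tset s.1 x1 b (tget s.1 x1 (b-1))) x1 (b-1))), (x1, b-1)) := by
      simp [cstep]
    rw [hc, ih (b-1) x1]
    simp only [show b-1+1 = b from by ring, Prod.mk.injEq]
    exact ⟨trivial, trivial, by push_cast; ring⟩

def cellsA (x1 y1 x2 y2 : Int) : List (Int × Int) :=
  (PySem.List.pyRange (x1+1) (x2+1) 1).map (fun x => (x, y1))
    ++ ((PySem.List.pyRange (y1+1) (y2+1) 1).map (fun y => (x2, y))
    ++ ((PySem.List.pyRange (x2-1) (x1-1) (-1)).map (fun x => (x, y2))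
    ++ (PySem.List.pyRange (y2-1) (y1-1) (-1)).map (fun y => (x1, y))))

theorem cells_chain (x1 y1 x2 y2 : Int) (t : List (List Int)) (v : Int)
    (hx : x1 ≤ x2) (hy : y1 ≤ y2) :
    (cellsA x1 y1 x2 y2).foldl cstep ((t, v), (x1, y1)) =
      ((PySem.List.pyRange (y2-1) (y1-1) (-1)).foldl
        (fun (s : List (List Int) × Int) y =>
          let t := tset s.1 x1 (y+1) (tget s.1 x1 y); (t, min s.2 (tget t x1 y)))
        ((PySem.List.pyRange (x2-1) (x1-1) (-1)).foldl
          (fun (s : List (List Int) × Int) x =>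
            let t := tset s.1 (x+1) y2 (tget s.1 x y2); (t, min s.2 (tget t x y2)))
          ((PySem.List.pyRange (y1+1) (y2+1) 1).foldl
            (fun (s : List (List Int) × Int) y =>
              let t := tset s.1 x2 (y-1) (tget s.1 x2 y); (t, min s.2 (tget t x2 y)))
            ((PySem.List.pyRange (x1+1) (x2+1) 1).foldl
              (fun (s : List (List Int) × Int) x =>
                let t := tset s.1 (x-1) y1 (tget s.1 x y1); (t, min s.2 (tget t x y1)))
              (t, v)))), (x1, y1)) := by
  have e1 : x2+1 = x1+1+((x2-x1).toNat : Int) := by omega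
  have e2 : y2+1 = y1+1+((y2-y1).toNat : Int) := by omega
  have e3 : x1-1 = x2-1-((x2-x1).toNat : Int) := by omega
  have e4 : y1-1 = y2-1-((y2-y1).toNat : Int) := by omega
  rw [cellsA, e1, e2, e3, e4, List.foldl_append, loop1_chain,
    show x1+((x2-x1).toNat : Int) = x2 from by omega, List.foldl_append, loop2_chain,
    show y1+((y2-y1).toNat : Int) = y2 from by omega, List.foldl_append, loop3_chain,
    show x2-((x2-x1).toNat : Int) = x1 from by omega, loop4_chain,
    show y2-((y2-y1).toNat : Int) = y1 from by omega]

def csB (x1 y1 x2 y2 : Int) : List (Int × Int) :=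
  (PySem.List.pyRange (x1+1) (x2+1) 1).map (fun x => (x, y1))
    ++ (PySem.List.pyRange (y1+1) (y2+1) 1).map (fun y => (x2, y))
    ++ (PySem.List.pyRange (x2-1) (x1-1) (-1)).map (fun x => (x, y2))
    ++ (PySem.List.pyRange (y2-1) y1 (-1)).map (fun y => (x1, y))

theorem pyRange_neg_split (a b : Int) (h : b ≤ a) :
    PySem.List.pyRange a (b-1) (-1) = PySem.List.pyRange a b (-1) ++ [b] := by
  rw [PySem.List.pyRange_neg_one_eq_reverse, PySem.List.pyRange_neg_one_eq_reverse,
    show b-1+1 = b from by ring, PySem.List.pyRange_one_cons (by omega), List.reverse_cons]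

theorem cells_split (x1 y1 x2 y2 : Int) (hy : y1 < y2) :
    cellsA x1 y1 x2 y2 = csB x1 y1 x2 y2 ++ [(x1, y1)] := by
  rw [cellsA, csB, pyRange_neg_split (y2-1) y1 (by omega)]
  simp [List.append_assoc]

theorem mem_csB {x1 y1 x2 y2 : Int} {c : Int × Int} (hx : x1 ≤ x2) (hyy : y1 ≤ y2) (h : c ∈ csB x1 y1 x2 y2) :
    (x1 ≤ c.1 ∧ c.1 ≤ x2 ∧ y1 ≤ c.2 ∧ c.2 ≤ y2) := by
  simp only [csB, List.mem_append, List.mem_map] at h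
  rcases h with ((⟨x, hx, rfl⟩ | ⟨y, hy, rfl⟩) | ⟨x, hx, rfl⟩) | ⟨y, hy, rfl⟩ <;>
    simp [PySem.List.mem_pyRange_one, PySem.List.mem_pyRange_neg_one] at * <;> omega

theorem nodup_neg_map {f : Int → Int × Int} (a b : Int) (hf : Function.Injective f) :
    ((PySem.List.pyRange a b (-1)).map f).Nodup := by
  refine List.Nodup.map hf ?_
  rw [PySem.List.pyRange_neg_one_eq_reverse]
  exact List.nodup_reverse.mpr (PySem.List.nodup_pyRange_one _ _)

theorem path_nodup (x1 y1 x2 y2 : Int) (hx : x1 < x2) (hy : y1 < y2) :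
    ((x1, y1) :: csB x1 y1 x2 y2).Nodup := by
  have inj1 : Function.Injective (fun x : Int => (x, y1)) := fun a b h => congrArg Prod.fst h
  have inj2 : Function.Injective (fun y : Int => (x2, y)) := fun a b h => congrArg Prod.snd h
  have inj3 : Function.Injective (fun x : Int => (x, y2)) := fun a b h => congrArg Prod.fst h
  have inj4 : Function.Injective (fun y : Int => (x1, y)) := fun a b h => congrArg Prod.snd h
  rw [List.nodup_cons]
  constructor
  · intro hmem
    have := mem_csB (by omega) (by omega) hmem
    simp only [csB, List.mem_append, List.mem_map] at hmem
    rcases hmem with ((⟨x, hx', he⟩ | ⟨y, hy', he⟩) | ⟨x, hx', he⟩) | ⟨y, hy', he⟩ <;>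
      rw [Prod.mk.injEq] at he <;>
      simp only [PySem.List.mem_pyRange_one, PySem.List.mem_pyRange_neg_one] at * <;> omega
  · rw [csB]
    rw [List.nodup_append, List.nodup_append, List.nodup_append]
    refine ⟨⟨⟨List.Nodup.map inj1 (PySem.List.nodup_pyRange_one _ _),
        List.Nodup.map inj2 (PySem.List.nodup_pyRange_one _ _), ?_⟩,
      nodup_neg_map _ _ inj3, ?_⟩, nodup_neg_map _ _ inj4, ?_⟩
    · intro c hc1 d hd
      simp only [List.mem_map, PySem.List.mem_pyRange_one] at hc1 hd
      obtain ⟨u, hu, hue⟩ := hd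
      obtain ⟨v, hv, hve⟩ := hc1
      intro hcd; rw [← hue, ← hve, Prod.mk.injEq] at hcd; omega
    · intro c hc1 d hd
      simp only [List.mem_append, List.mem_map, PySem.List.mem_pyRange_one,
        PySem.List.mem_pyRange_neg_one] at hc1 hd
      obtain ⟨u, hu, hue⟩ := hd
      rcases hc1 with ⟨v, hv, hve⟩ | ⟨v, hv, hve⟩ <;>
        (intro hcd; rw [← hue, ← hve, Prod.mk.injEq] at hcd; omega)
    · intro c hc1 d hd
      simp only [List.mem_append, List.mem_map, PySem.List.mem_pyRange_one,
        PySem.List.mem_pyRange_neg_one] at hc1 hd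
      obtain ⟨u, hu, hue⟩ := hd
      rcases hc1 with (⟨v, hv, hve⟩ | ⟨v, hv, hve⟩) | ⟨v, hv, hve⟩ <;>
        (intro hcd; rw [← hue, ← hve, Prod.mk.injEq] at hcd; omega)

theorem gld_append (l1 l2 : List (Int × Int)) (d : Int × Int) (h : l2 ≠ []) :
    (l1 ++ l2).getLastD d = l2.getLastD d := by
  rw [List.getLastD_eq_getLast?, List.getLastD_eq_getLast?, List.getLast?_append]
  cases hl : l2.getLast? with
  | none => exact absurd (List.getLast?_eq_none_iff.mp hl) h
  | some a => rfl

theorem pyRange_neg_getLast? (a b : Int) (h : b < a) :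
    (PySem.List.pyRange a b (-1)).getLast? = some (b + 1) := by
  rw [PySem.List.pyRange_neg_one_eq_reverse, PySem.List.pyRange_one_cons (by omega)]
  simp

theorem path_last (x1 y1 x2 y2 : Int) (hx : x1 < x2) (hy : y1 < y2) :
    (csB x1 y1 x2 y2).getLastD (x1, y1) = (x1, y1 + 1) := by
  rw [csB]
  by_cases h : y1 + 1 < y2
  · have h4 : (PySem.List.pyRange (y2-1) y1 (-1)).map (fun y => (x1, y)) ≠ [] := by
      rw [PySem.List.pyRange_neg_one_cons (by omega)]; simp
    rw [gld_append _ _ _ h4, List.getLastD_eq_getLast?, List.getLast?_map,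
      pyRange_neg_getLast? _ _ (by omega)]
    rfl
  · have h4 : (PySem.List.pyRange (y2-1) y1 (-1)).map (fun y => (x1, y)) = [] := by
      rw [PySem.List.pyRange_neg_one_eq_nil (by omega)]; rfl
    have h3 : (PySem.List.pyRange (x2-1) (x1-1) (-1)).map (fun x => (x, y2)) ≠ [] := by
      rw [PySem.List.pyRange_neg_one_cons (by omega)]; simp
    rw [h4, List.append_nil, gld_append _ _ _ h3, List.getLastD_eq_getLast?, List.getLast?_map,
      pyRange_neg_getLast? _ _ (by omega)]
    simp only [Option.map_some, Option.getD_some]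
    rw [Prod.mk.injEq]
    omega

theorem path_inR {R C : Nat} (x1 y1 x2 y2 : Int) (hx1 : 0 ≤ x1) (hx : x1 < x2) (hx2 : x2 < (R : Int))
    (hy1 : 0 ≤ y1) (hy : y1 < y2) (hy2 : y2 < (C : Int)) :
    ∀ c ∈ (x1, y1) :: csB x1 y1 x2 y2, inR R C c := by
  intro c hc
  rcases List.mem_cons.mp hc with rfl | hm
  · exact ⟨by omega, by omega, by omega, by omega⟩
  · obtain ⟨h1, h2, h3, h4⟩ := mem_csB (by omega) (by omega) hm
    exact ⟨by omega, by omega, by omega, by omega⟩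

theorem foldl_min_le_init (a : Int) : ∀ (l : List Int), List.foldl min a l ≤ a := by
  intro l
  induction l generalizing a with
  | nil => simp
  | cons x l ih => exact le_trans (ih (min a x)) (min_le_left a x)

theorem zip_structure : ∀ (cs : List (Int × Int)) (p : Int × Int) (vs : List Int) (v : Int),
    vs.length = cs.length →
    (p :: cs).zip (vs ++ [v]) = ((p :: cs).dropLast.zip vs) ++ [(cs.getLastD p, v)] := by
  intro cs
  induction cs with
  | nil => intro p vs v h; rw [List.length_eq_zero_iff.mp (by simpa using h : vs.length = 0)]; rfl
  | cons c cs ih =>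
    intro p vs v h
    cases vs with
    | nil => simp at h
    | cons w vs =>
      have h' : vs.length = cs.length := by simpa using h
      rw [List.cons_append, List.zip_cons_cons, ih c vs v h', List.dropLast_cons₂,
        List.zip_cons_cons, List.cons_append, List.getLastD_cons]

theorem csB_ne_nil (x1 y1 x2 y2 : Int) (hx : x1 < x2) : csB x1 y1 x2 y2 ≠ [] := by
  rw [csB, PySem.List.pyRange_one_cons (by omega)]
  simp

theorem query_eq {R C : Nat} (x1 y1 x2 y2 : Int) (t : List (List Int))
    (hSh : Sh t R C) (hx1 : 0 ≤ x1) (hx : x1 < x2) (hx2 : x2 < (R : Int))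
    (hy1 : 0 ≤ y1) (hy : y1 < y2) (hy2 : y2 < (C : Int)) :
    rotate_table x1 y1 x2 y2 t =
      (((border x1 y1 x2 y2).zip
          (PySem.List.slice ((border x1 y1 x2 y2).map (fun c => tget t c.1 c.2)) (some 1) none ++
           PySem.List.slice ((border x1 y1 x2 y2).map (fun c => tget t c.1 c.2)) none (some 1))).foldl
        (fun t cv => tset t cv.1.1 cv.1.2 cv.2) t,
       (PySem.List.min? ((border x1 y1 x2 y2).map (fun c => tget t c.1 c.2)) (fun v => v)).getD 0) := by
  obtain ⟨c1, cs', hcs⟩ : ∃ c1 cs', csB x1 y1 x2 y2 = c1 :: cs' := by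
    cases h : csB x1 y1 x2 y2 with
    | nil => exact absurd h (csB_ne_nil x1 y1 x2 y2 hx)
    | cons a l => exact ⟨a, l, rfl⟩
  set cs := csB x1 y1 x2 y2 with hcsdef
  set p : Int × Int := (x1, y1) with hp
  set tmp := tget t x1 y1 with htmp
  have hval : tget t p.1 p.2 = tmp := rfl
  have hnodup := path_nodup x1 y1 x2 y2 hx hy
  have hinR := path_inR (R := R) (C := C) x1 y1 x2 y2 hx1 hx hx2 hy1 hy hy2
  have hlast := path_last x1 y1 x2 y2 hx hy
  -- the chain-fold form of A's rotate
  have hch := cells_chain x1 y1 x2 y2 t tmp hx.le hy.le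
  have hsplit := cells_split x1 y1 x2 y2 hy
  rw [hsplit, List.foldl_append, List.foldl_cons, List.foldl_nil] at hch
  -- evaluate the nodup prefix of the chain
  have hfresh := chain_fresh (R := R) (C := C) cs p t tmp hSh hinR hnodup
  rw [hfresh] at hch
  rw [hlast] at hch
  set vs : List Int := cs.map (fun c => tget t c.1 c.2) with hvs
  set W : List ((Int × Int) × Int) := (p :: cs).dropLast.zip vs with hW
  set tpre : List (List Int) := W.foldl wstep t with htpre
  set mpre : Int := cs.foldl (fun m c => min m (tget t c.1 c.2)) tmp with hmpre
  -- facts about the prefix result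
  have hWtargets : ∀ q ∈ W, inR R C q.1 := by
    intro q hq
    have : q.1 ∈ W.map Prod.fst := List.mem_map_of_mem hq
    rw [hW, List.map_fst_zip (by
      rw [hvs, List.length_map, List.length_dropLast, List.length_cons]; simp)] at this
    exact hinR q.1 (List.mem_of_mem_dropLast this)
  have hShpre : Sh tpre R C := Sh_wr W t hSh hWtargets
  have hlastin : inR R C (x1, y1 + 1) := ⟨by omega, by omega, by omega, by omega⟩
  have hpin : inR R C (p.1, p.2) := by
    refine ?_
    have := hinR p (by rw [hp]; exact List.mem_cons_self)
    simpa using this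
  have hne : ((x1 : Int), y1 + 1) ≠ (p.1, p.2) := by
    rw [hp]; simp only [ne_eq, Prod.mk.injEq]; intro hh; omega
  -- the value A reads back at (x1,y1) after the prefix
  have hreadback : tget tpre p.1 p.2 = tget t c1.1 c1.2 := by
    have hW' : W = (p, tget t c1.1 c1.2) :: (cs.dropLast.zip (cs'.map (fun c => tget t c.1 c.2))) := by
      rw [hW, hvs, hcs]
      simp [List.dropLast_cons₂ , List.zip_cons_cons, hcs]
    rw [htpre, hW', List.foldl_cons]
    have hnotin : p ∉ (cs.dropLast.zip (cs'.map (fun c => tget t c.1 c.2))).map Prod.fst := by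
      intro hm
      have hsub : p ∈ cs.dropLast := by
        have := List.map_fst_zip (l₁ := cs.dropLast) (l₂ := cs'.map (fun c => tget t c.1 c.2)) (by
          rw [List.length_map, List.length_dropLast, hcs]; simp)
        rwa [this] at hm
      have : p ∈ cs := List.mem_of_mem_dropLast hsub
      rw [List.nodup_cons] at hnodup
      exact hnodup.1 this
    rw [tget_wr_notin _ _ p (by
        have : wstep t (p, tget t c1.1 c1.2) = tset t p.1 p.2 (tget t c1.1 c1.2) := rfl
        rw [this]; exact Sh_tset hSh hpin _)
      (by simpa using hpin)
      (by
        intro q hq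
        have : q.1 ∈ (cs.dropLast.zip (cs'.map (fun c => tget t c.1 c.2))).map Prod.fst :=
          List.mem_map_of_mem hq
        rw [List.map_fst_zip (by rw [List.length_map, List.length_dropLast, hcs]; simp)] at this
        exact hinR q.1 (by
          exact List.mem_cons_of_mem _ (List.mem_of_mem_dropLast this)))
      hnotin]
    show tget (tset t p.1 p.2 (tget t c1.1 c1.2)) p.1 p.2 = tget t c1.1 c1.2
    exact tget_tset_self hSh hpin _
  -- A's result
  have hA : rotate_table x1 y1 x2 y2 t = (tset tpre x1 (y1 + 1) tmp, mpre) := by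
    have hn := congrArg Prod.fst hch
    simp only [cstep] at hn
    simp only [rotate_table]
    rw [← hn]
    simp only []
    rw [Prod.mk.injEq]
    refine ⟨?_, ?_⟩
    · -- table component
      show tset (tset tpre (x1, y1+1).1 (x1, y1+1).2 (tget tpre p.1 p.2)) x1 (y1+1) tmp
          = tset tpre x1 (y1+1) tmp
      exact tset_tset_same hShpre hlastin _ _
    · -- min component
      show min mpre (tget (tset tpre (x1, y1+1).1 (x1, y1+1).2 (tget tpre p.1 p.2)) p.1 p.2) = mpre
      rw [tget_tset_ne hShpre hlastin hpin hne _, hreadback]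
      -- the value read back is already folded into mpre
      have hm1 : mpre = (vs).foldl min tmp := by
        rw [hmpre, hvs, ← List.foldl_map]
      have hv1 : vs = tget t c1.1 c1.2 :: cs'.map (fun c => tget t c.1 c.2) := by
        rw [hvs, hcs]; rfl
      have hle : mpre ≤ tget t c1.1 c1.2 := by
        rw [hm1, hv1, List.foldl_cons]
        exact le_trans (foldl_min_le_init _ _) (min_le_right _ _)
      exact min_eq_left hle
  rw [hA]
  -- B's result
  have hborder : border x1 y1 x2 y2 = p :: cs := by
    rw [hcsdef, border, csB, hp]
    simp [List.append_assoc]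
  rw [hborder]
  have hmapv : (p :: cs).map (fun c => tget t c.1 c.2) = tmp :: vs := by
    rw [List.map_cons, hvs, hval]
  rw [hmapv]
  have hshift : PySem.List.slice (tmp :: vs) (some 1) none ++ PySem.List.slice (tmp :: vs) none (some 1)
      = vs ++ [tmp] := by
    rw [PySem.List.slice_from_one, PySem.List.slice_to _ (by omega : (0:Int) ≤ 1)]
    rfl
  rw [hshift]
  have hlen : vs.length = cs.length := by rw [hvs, List.length_map]
  rw [zip_structure cs p vs tmp hlen, List.foldl_append, List.foldl_cons, List.foldl_nil, hlast]
  rw [Prod.mk.injEq]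
  refine ⟨rfl, ?_⟩
  rw [PySem.List.min?_id_cons]
  show mpre = (some (List.foldl min tmp vs)).getD 0
  rw [hmpre, hvs, ← List.foldl_map]
  rfl

theorem Sh_foldl {R C : Nat} {β : Type} (l : List β) (g : List (List Int) → β → List (List Int))
    (h : ∀ t x, x ∈ l → Sh t R C → Sh (g t x) R C) :
    ∀ t, Sh t R C → Sh (l.foldl g t) R C := by
  induction l with
  | nil => intro t ht; simpa using ht
  | cons x l ih =>
    intro t ht
    exact ih (fun t y hy hSh => h t y (by simp [hy]) hSh) _ (h t x (by simp) ht)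

theorem make_table_Sh (rows columns : Int) (h0 : 0 ≤ rows) (h1 : 0 ≤ columns) :
    Sh (make_table rows columns) (rows+1).toNat (columns+1).toNat := by
  rw [make_table]
  refine Sh_foldl _ _ ?_ _ ?_
  · intro t i hi hSh
    refine Sh_foldl _ _ ?_ _ hSh
    intro t' j hj hSh'
    rw [PySem.List.mem_pyRange_one] at hj
    rw [PySem.List.mem_pyRange_one] at hi
    exact Sh_tset hSh' ⟨by omega, by omega, by omega, by omega⟩ _
  · constructor
    · rw [List.length_map, PySem.List.length_pyRange_one]
      omega
    · intro r hr
      rw [List.mem_map] at hr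
      obtain ⟨x, hx, rfl⟩ := hr
      rw [List.length_map, PySem.List.length_pyRange_one]
      omega

theorem query_Sh {R C : Nat} (x1 y1 x2 y2 : Int) (t : List (List Int)) (vs2 : List Int)
    (hSh : Sh t R C) (hx1 : 0 ≤ x1) (hx : x1 < x2) (hx2 : x2 < (R : Int))
    (hy1 : 0 ≤ y1) (hy : y1 < y2) (hy2 : y2 < (C : Int)) :
    Sh (((border x1 y1 x2 y2).zip vs2).foldl (fun t cv => tset t cv.1.1 cv.1.2 cv.2) t) R C := by
  have hb : border x1 y1 x2 y2 = (x1, y1) :: csB x1 y1 x2 y2 := by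
    rw [border, csB]; simp [List.append_assoc]
  refine Sh_wr _ _ hSh ?_
  intro q hq
  have hmem : q.1 ∈ border x1 y1 x2 y2 := (List.of_mem_zip hq).1
  rw [hb] at hmem
  exact path_inR x1 y1 x2 y2 hx1 hx hx2 hy1 hy hy2 _ hmem

theorem main_fold {R C : Nat} (rows columns : Int) (hR : ((R : Nat) : Int) = rows + 1)
    (hC : ((C : Nat) : Int) = columns + 1) :
    ∀ (qs : List (Int × Int × Int × Int)) (t : List (List Int)) (out : List Int), Sh t R C →
    (∀ q ∈ qs, 0 ≤ q.1 ∧ q.1 < q.2.2.1 ∧ q.2.2.1 ≤ rows ∧ 0 ≤ q.2.1 ∧ q.2.1 < q.2.2.2 ∧ q.2.2.2 ≤ columns) →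
    (qs.foldl (fun (s : List (List Int) × List Int) q =>
        let r := rotate_table q.1 q.2.1 q.2.2.1 q.2.2.2 s.1
        (r.1, s.2 ++ [r.2])) (t, out)).2
      = (qs.foldl (fun (s : List (List Int) × List Int) q =>
          let path := border q.1 q.2.1 q.2.2.1 q.2.2.2
          let vals := path.map (fun c => tget s.1 c.1 c.2)
          let mn := (PySem.List.min? vals (fun v => v)).getD 0
          let shifted := PySem.List.slice vals (some 1) none ++ PySem.List.slice vals none (some 1)
          let t := (path.zip shifted).foldl (fun t cv => tset t cv.1.1 cv.1.2 cv.2) s.1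
          (t, s.2 ++ [mn])) (t, out)).2 := by
  intro qs
  induction qs with
  | nil => intro t out _ _; rfl
  | cons q qs ih =>
    intro t out hSh hq
    obtain ⟨h1, h2, h3, h4, h5, h6⟩ := hq q (by simp)
    have heq := query_eq (R := R) (C := C) q.1 q.2.1 q.2.2.1 q.2.2.2 t hSh
      h1 h2 (by omega) h4 h5 (by omega)
    simp only [List.foldl_cons]
    rw [heq]
    exact ih _ _ (query_Sh q.1 q.2.1 q.2.2.1 q.2.2.2 t _ hSh h1 h2 (by omega) h4 h5 (by omega))
      (fun q' hq' => hq q' (by simp [hq']))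

-- ===== VERDICT (by name: the statement is the Claim_ definition above) =====
theorem solution_spec : Claim_equal_solution := by
  intro rows columns queries hdom hpre
  show solution rows columns queries = solution_alt rows columns queries
  cases queries with
  | nil => rfl
  | cons q qs =>
    obtain ⟨h1, h2, h3, h4, h5, h6⟩ := hpre q (by simp)
    have h0r : 0 ≤ rows := by omega
    have h0c : 0 ≤ columns := by omega
    rw [solution, solution_alt]
    exact main_fold rows columns (by omega : (((rows+1).toNat : Nat) : Int) = rows + 1)
      (by omega : (((columns+1).toNat : Nat) : Int) = columns + 1) (q :: qs) _ []
      (make_table_Sh rows columns h0r h0c) hpre
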